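-- pv_equiv track=rewrite | github.com/andresfp97/Ejercicios_Python | 06_listas/sweetco.py | proMayIngSem
-- ===== SOURCE A (Python) =====
-- def proMayIngSem(mat, lst):
--     lsting = []
--     for f in range(len(mat)):
--         suma = 0
--         for c in range(len(mat[f])):
--             suma += mat[f][c] * lst[f]
--         lsting.append(suma)
--         # lsting.append(sum(mat[f] * lst [f]))
--
--     mayor = max(lsting)
--     prod = lsting.index(mayor) + 1
--
--     return [prod, mayor]
-- ===== SOURCE B (Python) =====
-- def proMayIngSem(mat, lst):
--     # Single pass with a running best (pos, value); no intermediate list.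
--     pairs = list(zip(mat, lst))
--     row0, w0 = pairs[0]
--     best_pos, best_val = 1, sum(row0) * w0
--     pos = 2
--     for row, w in pairs[1:]:
--         s = sum(row) * w
--         if s > best_val:
--             best_pos, best_val = pos, s
--         pos += 1
--     return [best_pos, best_val]
-- ===== Notes on version B (the rewrite author's own statement) =====
-- stated objective: simpler
-- what changed: B replaces A's build-a-list-of-weighted-sums-then-max-then-.index (two extra passes) by a single pass over zip(mat, lst) keeping a running best value and its 1-based position, updated only on strictly greater sums.
-- outside the precondition, e.g. on proMayIngSem([[]], []): A returns [1, 0], B raises IndexError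
import Mathlib
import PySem

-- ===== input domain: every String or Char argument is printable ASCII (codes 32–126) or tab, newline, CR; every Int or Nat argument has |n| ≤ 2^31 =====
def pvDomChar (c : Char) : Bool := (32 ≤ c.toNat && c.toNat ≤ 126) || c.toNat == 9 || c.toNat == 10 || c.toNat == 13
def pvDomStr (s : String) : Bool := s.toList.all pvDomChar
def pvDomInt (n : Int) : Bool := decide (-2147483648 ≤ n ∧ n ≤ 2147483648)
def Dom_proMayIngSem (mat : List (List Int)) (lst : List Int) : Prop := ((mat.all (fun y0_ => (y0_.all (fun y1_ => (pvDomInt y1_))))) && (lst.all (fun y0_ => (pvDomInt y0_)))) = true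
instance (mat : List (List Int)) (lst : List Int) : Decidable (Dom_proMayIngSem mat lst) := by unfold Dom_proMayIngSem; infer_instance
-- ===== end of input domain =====

-- B is a single pass with a running best instead of A's list + max + .index; return value only.

-- ===== PORT A =====
def proMayIngSem (mat : List (List Int)) (lst : List Int) : List Int :=
  let lsting := (List.range mat.length).foldl (fun acc f =>
      let row := mat.getD f []
      let suma := (List.range row.length).foldl (fun s c => s + row.getD c 0 * lst.getD f 0) 0
      acc ++ [suma]) []
  match PySem.List.max? lsting (fun x => x) with
  | none => []   -- Python: max([]) raises ValueError (excluded by Pre_)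
  | some mayor => [((PySem.List.index? lsting mayor).getD 0 : Nat) + 1, mayor]

-- ===== PORT B =====
def pvAltLoop (pairs : List (List Int × Int)) (pos bp bv : Int) : List Int :=
  match pairs with
  | [] => [bp, bv]
  | (row, w) :: rest =>
      let s := row.sum * w
      if bv < s then pvAltLoop rest (pos + 1) pos s else pvAltLoop rest (pos + 1) bp bv

def proMayIngSem_alt (mat : List (List Int)) (lst : List Int) : List Int :=
  match mat.zip lst with
  | [] => []   -- Python: pairs[0] raises IndexError (excluded by Pre_)
  | (row0, w0) :: rest => pvAltLoop rest 2 1 (row0.sum * w0)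

-- ===== PRECONDITION & SPEC =====
-- Pre_ excludes the empty matrix (A raises ValueError) and matrices longer than lst, where A either
-- raises IndexError or — only when every row at an index ≥ len(lst) is empty, so A never reads lst
-- there — returns a value by that accident while B's zip-based pass raises IndexError.
def Pre_proMayIngSem (mat : List (List Int)) (lst : List Int) : Prop :=
  mat ≠ [] ∧ mat.length ≤ lst.length
instance (mat : List (List Int)) (lst : List Int) : Decidable (Pre_proMayIngSem mat lst) := by unfold Pre_proMayIngSem; infer_instance

def pvWitness_proMayIngSem : List (List Int) × List Int := ([[1, 2], [3]], [2, 5])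

def Spec_proMayIngSem (mat : List (List Int)) (lst : List Int) (out : List Int) : Prop := out = proMayIngSem_alt mat lst
instance (mat : List (List Int)) (lst : List Int) (out : List Int) : Decidable (Spec_proMayIngSem mat lst out) := by unfold Spec_proMayIngSem; infer_instance

-- ===== CLAIM (what is proved, stated in full; the proofs are below) =====
def Claim_equal_proMayIngSem : Prop := ∀ (mat : List (List Int)) (lst : List Int), Dom_proMayIngSem mat lst → Pre_proMayIngSem mat lst → Spec_proMayIngSem mat lst (proMayIngSem mat lst)

-- ===== LEMMAS AND PROOFS =====

-- the weighted sums both programs are about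
def pvWs (mat : List (List Int)) (lst : List Int) : List Int :=
  (mat.zip lst).map (fun p => p.1.sum * p.2)

-- A's inner loop is row.sum * w
lemma pv_inner (row : List Int) (w : Int) :
    (List.range row.length).foldl (fun s c => s + row.getD c 0 * w) 0 = row.sum * w := by
  rw [PySem.List.foldl_add]
  have h1 : (List.range row.length).map (fun c => row.getD c 0 * w)
      = row.map (fun x => x * w) := by
    apply List.ext_getElem
    · simp
    · intro i h1 h2
      have hr : i < row.length := by simpa using h2
      simp [List.getD_eq_getElem?_getD, List.getElem?_eq_getElem hr]
  rw [h1]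
  simp [List.sum_map_mul_right]

-- A's lsting equals the weighted sums (given len(mat) ≤ len(lst))
lemma pv_lsting (mat : List (List Int)) (lst : List Int) (h : mat.length ≤ lst.length) :
    ((List.range mat.length).foldl (fun acc f =>
      let row := mat.getD f []
      let suma := (List.range row.length).foldl (fun s c => s + row.getD c 0 * lst.getD f 0) 0
      acc ++ [suma]) []) = pvWs mat lst := by
  rw [PySem.List.foldl_append_singleton_eq_map, List.nil_append]
  simp only [pv_inner]
  induction mat generalizing lst with
  | nil => simp [pvWs]
  | cons r mt ih =>
    cases lst with
    | nil => simp at h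
    | cons w lt =>
      have := ih lt (by simpa using h)
      simp only [List.length_cons, List.range_succ_eq_map, List.map_cons, List.map_map]
      simp only [pvWs, List.zip_cons_cons, List.map_cons]
      refine congrArg₂ _ (by simp) ?_
      simp only [pvWs] at this
      rw [← this]
      apply List.map_congr_left
      intro i hi
      simp

-- B's loop over pairs only sees the weighted sums
def pvWLoop (ws : List Int) (pos bp bv : Int) : List Int :=
  match ws with
  | [] => [bp, bv]
  | s :: rest => if bv < s then pvWLoop rest (pos + 1) pos s else pvWLoop rest (pos + 1) bp bv

lemma pv_loop_map (pairs : List (List Int × Int)) (pos bp bv : Int) :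
    pvAltLoop pairs pos bp bv = pvWLoop (pairs.map (fun p => p.1.sum * p.2)) pos bp bv := by
  induction pairs generalizing pos bp bv with
  | nil => rfl
  | cons p rest ih =>
    obtain ⟨row, w⟩ := p
    simp only [pvAltLoop, pvWLoop, List.map_cons]
    split_ifs <;> apply ih

-- what A returns when lsting = l
def pvARes (l : List Int) : List Int :=
  match PySem.List.max? l (fun x => x) with
  | none => []
  | some mayor => [((PySem.List.index? l mayor).getD 0 : Nat) + 1, mayor]

-- core invariant: pre is the processed prefix, bv its max, k its first index
lemma pv_core (ws : List Int) (pre : List Int) (bv : Int) (k : Nat)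
    (hmem : bv ∈ pre) (hmax : ∀ x ∈ pre, x ≤ bv)
    (hidx : PySem.List.index? pre bv = some k) :
    pvWLoop ws ((pre.length : Int) + 1) ((k : Int) + 1) bv = pvARes (pre ++ ws) := by
  induction ws generalizing pre bv k with
  | nil =>
    rw [List.append_nil]
    obtain ⟨m, hm⟩ : ∃ m, PySem.List.max? pre (fun x => x) = some m := by
      cases hmq : PySem.List.max? pre (fun x => x) with
      | none => rw [PySem.List.max?_eq_none_iff] at hmq; subst hmq; simp at hmem
      | some m => exact ⟨m, rfl⟩
    have hmmem := PySem.List.max?_mem hm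
    have hmle := PySem.List.max?_isMax hm
    have : m = bv := le_antisymm (hmax m hmmem) (hmle bv hmem)
    subst this
    rw [PySem.List.index?_eq_idxOf?] at hidx
    simp [pvARes, pvWLoop, hm, hidx]
  | cons s rest ih =>
    simp only [pvWLoop]
    by_cases hgt : bv < s
    · rw [if_pos hgt]
      have hnot : s ∉ pre := fun hs => absurd hgt (not_lt.mpr (hmax s hs))
      have h1 := ih (pre ++ [s]) s pre.length (by simp) ?_ ?_
      · rw [List.append_assoc] at h1
        simpa using h1
      · intro x hx
        rcases List.mem_append.mp hx with h | h
        · exact le_of_lt (lt_of_le_of_lt (hmax x h) hgt)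
        · simp at h; omega
      · exact PySem.List.index?_append_singleton_self (l := pre) (c := s) hnot
    · rw [if_neg hgt]
      have h1 := ih (pre ++ [s]) bv k (by simp [hmem]) ?_ ?_
      · rw [List.append_assoc] at h1
        simpa using h1
      · intro x hx
        rcases List.mem_append.mp hx with h | h
        · exact hmax x h
        · simp at h; subst h; exact not_lt.mp hgt
      · rw [PySem.List.index?_append_of_mem _ hmem, hidx]

-- ===== VERDICT (by name: the statement is the Claim_ definition above) =====
theorem proMayIngSem_spec : Claim_equal_proMayIngSem := by
  intro mat lst _ hpre
  obtain ⟨hne, hlen⟩ := hpre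
  show proMayIngSem mat lst = proMayIngSem_alt mat lst
  cases hz : mat.zip lst with
  | nil =>
    exfalso
    have h0 : min mat.length lst.length = 0 := by
      have := congrArg List.length hz; simpa using this
    have : mat.length = 0 := by omega
    exact hne (List.eq_nil_of_length_eq_zero this)
  | cons p rest =>
    obtain ⟨row0, w0⟩ := p
    have hB : proMayIngSem_alt mat lst
        = pvWLoop (rest.map (fun p => p.1.sum * p.2)) 2 1 (row0.sum * w0) := by
      simp [proMayIngSem_alt, hz, pv_loop_map]
    have hA : proMayIngSem mat lst = pvARes (pvWs mat lst) := by
      unfold proMayIngSem pvARes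
      rw [pv_lsting mat lst hlen]
    have hws : pvWs mat lst = (row0.sum * w0) :: rest.map (fun p => p.1.sum * p.2) := by
      simp [pvWs, hz]
    have h := pv_core (rest.map (fun p => p.1.sum * p.2)) [row0.sum * w0] (row0.sum * w0) 0
      (by simp) (by simp) (PySem.List.index?_cons_self _ _)
    rw [hA, hB, hws]
    simpa using h.symm
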